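-- pv_equiv track=rewrite | github.com/stevest/remod | extract_swc_morphology.py | dend_name
-- ===== SOURCE A (Python) =====
-- def dend_name(dlist, points):
--
-- 	exceptions=[]
-- 	dend_names={}
--
-- 	basal=[]
-- 	apical=[]
--
-- 	undef_index=0
-- 	soma_index=0
-- 	axon_index=0
-- 	basal_index=0
-- 	apic_index=0
--
-- 	for i in dlist:
-- 		if points[i][1]==0:
-- 			dend_names[i]='undef' + '[' + str(undef_index) + ']'
-- 			undef_index+=1
-- 		elif points[i][1]==1:
-- 			dend_names[i]='soma' + '[' + str(soma_index) + ']'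
-- 			soma_index+=1
-- 		elif points[i][1]==2:
-- 			dend_names[i]='axon' + '[' + str(axon_index) + ']'
-- 			axon_index+=1
-- 		elif points[i][1]==3:
-- 			dend_names[i]='dend' + '[' + str(basal_index) + ']'
-- 			basal.append(i)
-- 			basal_index+=1
-- 		elif points[i][1]==4:
-- 			dend_names[i]='apic' + '[' + str(apic_index) + ']'
-- 			apical.append(i)
-- 			apic_index+=1
-- 		else:
-- 			exceptions.append(i)
--
-- 	return dend_names, exceptions, basal, apical
-- ===== SOURCE B (Python) =====
-- # Staged re-implementation: extract the code list once, then name each valid point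
-- # by its prefix-count (no running counters), and build basal/apical/exception
-- # collections by separate comprehensions instead of appending inside the ladder.
-- def dend_name(dlist, points):
--     names = ('undef', 'soma', 'axon', 'dend', 'apic')
--     codes = [points[i][1] for i in dlist]
--     dend_names = {}
--     exceptions = []
--     for k, (i, c) in enumerate(zip(dlist, codes)):
--         if 0 <= c <= 4:
--             dend_names[i] = names[c] + '[' + str(codes[:k].count(c)) + ']'
--         else:
--             exceptions.append(i)
--     basal = [i for i, c in zip(dlist, codes) if c == 3]
--     apical = [i for i, c in zip(dlist, codes) if c == 4]
--     return dend_names, exceptions, basal, apical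
-- ===== Notes on version B (the rewrite author's own statement) =====
-- stated objective: alternative
-- what changed: Replaces A's single stateful pass (five running counter variables plus in-loop appends in an if/elif ladder) by a staged computation: the code list is extracted first, each valid point's index is the closed-form prefix-count of its code among earlier codes, and basal/apical are separate filter comprehensions.
import Mathlib
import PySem

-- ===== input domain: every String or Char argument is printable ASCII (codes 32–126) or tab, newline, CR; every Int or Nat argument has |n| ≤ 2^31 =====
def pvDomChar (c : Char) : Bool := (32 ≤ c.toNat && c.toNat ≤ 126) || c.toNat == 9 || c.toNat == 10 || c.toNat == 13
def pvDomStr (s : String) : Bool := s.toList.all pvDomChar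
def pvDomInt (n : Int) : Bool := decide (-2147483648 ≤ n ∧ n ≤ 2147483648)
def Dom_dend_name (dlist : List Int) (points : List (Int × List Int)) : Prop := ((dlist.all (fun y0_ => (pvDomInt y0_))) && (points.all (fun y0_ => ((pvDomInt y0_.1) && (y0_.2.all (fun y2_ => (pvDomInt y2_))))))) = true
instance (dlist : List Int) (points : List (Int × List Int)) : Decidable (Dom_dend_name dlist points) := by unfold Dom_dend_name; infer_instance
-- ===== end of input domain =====

-- B replaces A's single stateful pass (five counters, in-ladder appends) by staged
-- computation: codes extracted once, names from prefix-counts, basal/apical by filters;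
-- same results, different decomposition ('alternative'); equivalence is about the return value.

-- ===== PORT A =====
-- loop state: (dend_names, exceptions, basal, apical, undef_index, soma_index, axon_index, basal_index, apic_index)
def dendNameStepA (points : List (Int × List Int))
    (st : PySem.Dict Int String × List Int × List Int × List Int × Int × Int × Int × Int × Int)
    (i : Int) : PySem.Dict Int String × List Int × List Int × List Int × Int × Int × Int × Int × Int :=
  let (d, ex, b, ap, u, s, a, bi, api) := st
  -- points[i][1]: dict lookup then list index 1; Pre_ keeps the key present and the row long enough
  let code := PySem.List.pyGetD ((PySem.Dict.ofList points).getD i []) 1 0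
  if code == 0 then
    (d.insert i ("undef" ++ "[" ++ PySem.Int.toStr u ++ "]"), ex, b, ap, u + 1, s, a, bi, api)
  else if code == 1 then
    (d.insert i ("soma" ++ "[" ++ PySem.Int.toStr s ++ "]"), ex, b, ap, u, s + 1, a, bi, api)
  else if code == 2 then
    (d.insert i ("axon" ++ "[" ++ PySem.Int.toStr a ++ "]"), ex, b, ap, u, s, a + 1, bi, api)
  else if code == 3 then
    (d.insert i ("dend" ++ "[" ++ PySem.Int.toStr bi ++ "]"), ex, b ++ [i], ap, u, s, a, bi + 1, api)
  else if code == 4 then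
    (d.insert i ("apic" ++ "[" ++ PySem.Int.toStr api ++ "]"), ex, b, ap ++ [i], u, s, a, bi, api + 1)
  else
    (d, ex ++ [i], b, ap, u, s, a, bi, api)

def dend_name (dlist : List Int) (points : List (Int × List Int)) : (List (Int × String)) × List Int × List Int × List Int :=
  let (d, ex, b, ap, _, _, _, _, _) :=
    dlist.foldl (dendNameStepA points) (PySem.Dict.empty, [], [], [], 0, 0, 0, 0, 0)
  (d.items, ex, b, ap)

-- ===== PORT B =====
def dendNameNames : List String := ["undef", "soma", "axon", "dend", "apic"]

-- points[i][1]: dict lookup then list index 1; Pre_ keeps the key present and the row long enough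
def dendNameCode (points : List (Int × List Int)) (i : Int) : Int :=
  PySem.List.pyGetD ((PySem.Dict.ofList points).getD i []) 1 0

-- body of B's naming loop (codes is the staged full code list; codes[:k].count(c) names item k)
def dendNameStepB (codes : List Int)
    (st : PySem.Dict Int String × List Int) (kic : Int × Int × Int) :
    PySem.Dict Int String × List Int :=
  let (k, i, c) := kic
  if 0 ≤ c ∧ c ≤ 4 then
    (st.1.insert i (PySem.List.pyGetD dendNameNames c ""
        ++ "[" ++ PySem.Int.toStr ((PySem.List.slice codes none (some k)).count c) ++ "]"), st.2)
  else
    (st.1, st.2 ++ [i])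

def dend_name_alt (dlist : List Int) (points : List (Int × List Int)) : (List (Int × String)) × List Int × List Int × List Int :=
  let codes := dlist.map (dendNameCode points)
  let (d, ex) := (PySem.List.enumerate (dlist.zip codes) 0).foldl
      (dendNameStepB codes) (PySem.Dict.empty, [])
  let basal := ((dlist.zip codes).filter (fun ic => ic.2 == 3)).map (·.1)
  let apical := ((dlist.zip codes).filter (fun ic => ic.2 == 4)).map (·.1)
  (d.items, ex, basal, apical)

-- ===== PRECONDITION & SPEC =====
-- Pre_ excludes exactly the inputs where A raises: i not a key of points (KeyError)
-- or the row points[i] shorter than 2 (IndexError). B raises there too.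
def Pre_dend_name (dlist : List Int) (points : List (Int × List Int)) : Prop :=
  ∀ i ∈ dlist, ((PySem.Dict.ofList points).get? i).isSome = true ∧
    2 ≤ (((PySem.Dict.ofList points).get? i).getD []).length
instance (dlist : List Int) (points : List (Int × List Int)) : Decidable (Pre_dend_name dlist points) := by unfold Pre_dend_name; infer_instance
def pvWitness_dend_name : List Int × (List (Int × List Int)) := ([0, 1, 0, 1], [(0, [1, 3]), (1, [2, 0, 5])])

def Spec_dend_name (dlist : List Int) (points : List (Int × List Int)) (out : (List (Int × String)) × List Int × List Int × List Int) : Prop := out = dend_name_alt dlist points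
instance (dlist : List Int) (points : List (Int × List Int)) (out : (List (Int × String)) × List Int × List Int × List Int) : Decidable (Spec_dend_name dlist points out) := by unfold Spec_dend_name; infer_instance

-- ===== CLAIM (what is proved, stated in full; the proofs are below) =====
def Claim_equal_dend_name : Prop := ∀ (dlist : List Int) (points : List (Int × List Int)), Dom_dend_name dlist points → Pre_dend_name dlist points → Spec_dend_name dlist points (dend_name dlist points)

-- ===== LEMMAS AND PROOFS =====
-- B's fold body only looks at codes[:k] with k < l.length, so extending codes past
-- the enumerated indices does not change the fold.
lemma dendNameStepB_congr (codes : List Int) (c : Int) (l : List (Int × Int))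
    (hlen : l.length ≤ codes.length) (init : PySem.Dict Int String × List Int) :
    (PySem.List.enumerate l 0).foldl (dendNameStepB (codes ++ [c])) init
      = (PySem.List.enumerate l 0).foldl (dendNameStepB codes) init := by
  apply PySem.List.foldl_congr_mem
  intro acc x hx
  rcases (PySem.List.mem_enumerate_iff _ _ _).1 hx with ⟨k, hk, rfl⟩
  have hkc : k ≤ codes.length := le_trans (le_of_lt hk) hlen
  simp only [dendNameStepB, zero_add, PySem.List.slice_to_natCast,
    List.take_append_of_le_length hkc]

-- Invariant, by reverse induction: A's fold state on l is B's staged data on l,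
-- the counters being the code-counts of l's code list.
lemma dendName_fold_inv (points : List (Int × List Int)) (l : List Int) :
    l.foldl (dendNameStepA points) (PySem.Dict.empty, [], [], [], 0, 0, 0, 0, 0)
      = (let codes := l.map (dendNameCode points)
         let (d, ex) := (PySem.List.enumerate (l.zip codes) 0).foldl
             (dendNameStepB codes) (PySem.Dict.empty, [])
         (d, ex,
          ((l.zip codes).filter (fun ic => ic.2 == 3)).map (·.1),
          ((l.zip codes).filter (fun ic => ic.2 == 4)).map (·.1),
          (codes.count 0 : Int), (codes.count 1 : Int), (codes.count 2 : Int),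
          (codes.count 3 : Int), (codes.count 4 : Int))) := by
  induction l using List.reverseRecOn with
  | nil => simp
  | append_singleton l x ih =>
    simp only [List.foldl_append, List.foldl_cons, List.foldl_nil, ih]
    simp only [List.map_append, List.map_cons, List.map_nil]
    rw [List.zip_append (by simp)]
    simp only [List.zip_cons_cons]
    rw [PySem.List.enumerate_append, List.foldl_append]
    rw [dendNameStepB_congr _ _ _ (by simp)]
    have hlen : ((l.zip (l.map (dendNameCode points))).length : Int) = (l.map (dendNameCode points)).length := by simp
    set codes := l.map (dendNameCode points) with hcodes
    set c := dendNameCode points x with hc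
    have hslice : PySem.List.slice (codes ++ [c]) none (some ((0 : Int) + ((l.zip codes).length : Nat))) = codes := by
      rw [zero_add, PySem.List.slice_to_natCast, List.take_append_of_le_length (by simp [hcodes]),
        List.take_of_length_le (by simp [hcodes])]
    simp only [PySem.List.enumerate_cons, List.foldl_cons, dendNameStepB, hslice]
    have hcode : PySem.List.pyGetD ((PySem.Dict.ofList points).getD x []) 1 0 = c := rfl
    have n0 : PySem.List.pyGetD dendNameNames (0 : Int) "" = "undef" := by decide
    have n1 : PySem.List.pyGetD dendNameNames (1 : Int) "" = "soma" := by decide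
    have n2 : PySem.List.pyGetD dendNameNames (2 : Int) "" = "axon" := by decide
    have n3 : PySem.List.pyGetD dendNameNames (3 : Int) "" = "dend" := by decide
    have n4 : PySem.List.pyGetD dendNameNames (4 : Int) "" = "apic" := by decide
    by_cases h0 : c = 0
    · simp [dendNameStepA, hcode, h0, n0, List.count_append]
    by_cases h1 : c = 1
    · simp [dendNameStepA, hcode, h1, n1, List.count_append]
    by_cases h2 : c = 2
    · simp [dendNameStepA, hcode, h2, n2, List.count_append]
    by_cases h3 : c = 3
    · simp [dendNameStepA, hcode, h3, n3, List.count_append]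
    by_cases h4 : c = 4
    · simp [dendNameStepA, hcode, h4, n4, List.count_append]
    · have h5 : ¬((0 : Int) ≤ c ∧ c ≤ 4) := by omega
      simp [dendNameStepA, hcode, h0, h1, h2, h3, h4, h5, List.count_append]

-- ===== VERDICT (by name: the statement is the Claim_ definition above) =====
theorem dend_name_spec : Claim_equal_dend_name := by
  intro dlist points _ _
  unfold Spec_dend_name dend_name dend_name_alt
  simp only [dendName_fold_inv]
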